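-- pv_equiv track=rewrite | github.com/SzYang721/FPaddleOCR | songze_code_PaddleOCR/extract_txt_and_table.py | merge_data_sim
-- ===== SOURCE A (Python) =====
-- def merge_data_sim(list_input):
--     merged_list = []
--     current_group = []
--     for sub_list in list_input:
--         if not current_group:  # Add first sub-list
--             current_group.append(sub_list)
--         elif len(sub_list) == len(current_group[-1]):  # Same length
--             current_group.append(sub_list)
--         else:
--             merged_list.append(current_group)
--             current_group = [sub_list]
--     if current_group:
--         merged_list.append(current_group)
--     return merged_list
-- ===== SOURCE B (Python) =====
-- def _split_run(k, rest):
--     run = []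
--     for s in rest:
--         if len(s) != k:
--             break
--         run.append(s)
--     return run, rest[len(run):]
--
--
-- def merge_data_sim(list_input):
--     if not list_input:
--         return []
--     head = list_input[0]
--     run, rest = _split_run(len(head), list_input[1:])
--     return [[head] + run] + merge_data_sim(rest)
-- ===== Notes on version B (the rewrite author's own statement) =====
-- stated objective: alternative
-- what changed: Replaces A's single fold with a current_group accumulator and end-of-loop flush by a recursive run-splitting decomposition: take the maximal front run of equal-length sublists, emit it as one group, recurse on the remainder.
import Mathlib
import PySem

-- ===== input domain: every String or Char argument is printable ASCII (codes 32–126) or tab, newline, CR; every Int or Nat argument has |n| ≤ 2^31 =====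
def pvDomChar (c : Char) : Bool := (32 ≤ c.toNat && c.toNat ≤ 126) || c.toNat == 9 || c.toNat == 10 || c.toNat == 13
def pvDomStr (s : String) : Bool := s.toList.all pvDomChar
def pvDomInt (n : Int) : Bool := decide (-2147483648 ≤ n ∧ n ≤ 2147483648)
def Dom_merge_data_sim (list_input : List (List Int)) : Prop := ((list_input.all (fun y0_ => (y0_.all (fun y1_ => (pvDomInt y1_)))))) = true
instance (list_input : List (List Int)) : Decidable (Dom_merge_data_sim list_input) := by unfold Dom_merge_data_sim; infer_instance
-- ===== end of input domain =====

-- B changes the decomposition (recursive run-splitting instead of A's accumulator-and-flush fold); same values, same cost.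

-- ===== PORT A =====
-- state = (merged_list, current_group); one fold step per sub_list, flush at the end
def mergeStepA (st : List (List (List Int)) × List (List Int)) (sub : List Int) :
    List (List (List Int)) × List (List Int) :=
  if st.2 = [] then (st.1, st.2 ++ [sub])
  else if sub.length = (st.2.getLastD []).length then (st.1, st.2 ++ [sub])
  else (st.1 ++ [st.2], [sub])

def merge_data_sim (list_input : List (List Int)) : List (List (List Int)) :=
  let st := list_input.foldl mergeStepA ([], [])
  if st.2 ≠ [] then st.1 ++ [st.2] else st.1

-- ===== PORT B =====
-- take the maximal front run of sublists whose length equals the head's, recurse on the rest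
def merge_data_sim_alt : List (List Int) → List (List (List Int))
  | [] => []
  | x :: xs =>
    (x :: xs.takeWhile (fun s => s.length = x.length)) ::
      merge_data_sim_alt (xs.dropWhile (fun s => s.length = x.length))
termination_by l => l.length
decreasing_by
  have := List.length_dropWhile_le (fun s => s.length = x.length) xs
  simp; omega

-- ===== PRECONDITION & SPEC =====
def Spec_merge_data_sim (list_input : List (List Int)) (out : List (List (List Int))) : Prop := out = merge_data_sim_alt list_input
instance (list_input : List (List Int)) (out : List (List (List Int))) : Decidable (Spec_merge_data_sim list_input out) := by unfold Spec_merge_data_sim; infer_instance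

-- ===== CLAIM (what is proved, stated in full; the proofs are below) =====
def Claim_equal_merge_data_sim : Prop := ∀ (list_input : List (List Int)), Dom_merge_data_sim list_input → Spec_merge_data_sim list_input (merge_data_sim list_input)

-- ===== LEMMAS AND PROOFS =====

-- proof-only characterisation of A's fold with a nonempty current group
def gAux : List (List Int) → List (List Int) → List (List (List Int))
  | cur, [] => [cur]
  | cur, s :: xs =>
    if s.length = (cur.getLastD []).length then gAux (cur ++ [s]) xs
    else cur :: gAux [s] xs

lemma foldA_eq_gAux (xs : List (List Int)) :
    ∀ (merged : List (List (List Int))) (cur : List (List Int)), cur ≠ [] →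
      (let st := xs.foldl mergeStepA (merged, cur)
       if st.2 ≠ [] then st.1 ++ [st.2] else st.1) = merged ++ gAux cur xs := by
  induction xs with
  | nil => intro merged cur h; simp [gAux, h]
  | cons s xs ih =>
    intro merged cur h
    simp only [List.foldl_cons, gAux]
    by_cases hl : s.length = (cur.getLastD []).length
    · rw [if_pos hl]
      have : mergeStepA (merged, cur) s = (merged, cur ++ [s]) := by
        simp [mergeStepA, h, hl]
      rw [this, ih merged (cur ++ [s]) (by simp)]
    · rw [if_neg hl]
      have hl' : ¬s.length = (cur.getLast?.getD []).length := by
        rw [← List.getLastD_eq_getLast?]; exact hl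
      have : mergeStepA (merged, cur) s = (merged ++ [cur], [s]) := by
        simp [mergeStepA, h, hl']
      rw [this, ih (merged ++ [cur]) [s] (by simp)]
      simp

lemma gAux_eq_alt (xs : List (List Int)) :
    ∀ (cur : List (List Int)), cur ≠ [] →
      gAux cur xs =
        (cur ++ xs.takeWhile (fun s => s.length = (cur.getLastD []).length)) ::
          merge_data_sim_alt (xs.dropWhile (fun s => s.length = (cur.getLastD []).length)) := by
  induction xs with
  | nil => intro cur h; simp [gAux, merge_data_sim_alt]
  | cons s xs ih =>
    intro cur h
    simp only [gAux]
    by_cases hl : s.length = (cur.getLastD []).length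
    · rw [if_pos hl]
      rw [ih (cur ++ [s]) (by simp)]
      have hlast : ((cur ++ [s]).getLastD []) = s := by simp
      rw [hlast]
      simp only [hl]
      have hl' : s.length = (cur.getLast?.getD []).length := by
        rw [← List.getLastD_eq_getLast?]; exact hl
      simp [List.takeWhile_cons, List.dropWhile_cons, hl']
    · rw [if_neg hl]
      rw [ih [s] (by simp)]
      rw [List.takeWhile_cons, List.dropWhile_cons]
      simp only [hl, decide_false, if_false, Bool.false_eq_true]
      simp [merge_data_sim_alt]

-- ===== VERDICT (by name: the statement is the Claim_ definition above) =====
theorem merge_data_sim_spec : Claim_equal_merge_data_sim := by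
  intro list_input _
  unfold Spec_merge_data_sim
  cases list_input with
  | nil => simp [merge_data_sim, merge_data_sim_alt]
  | cons x xs =>
    unfold merge_data_sim
    simp only [List.foldl_cons]
    have h1 : mergeStepA ([], []) x = ([], [x]) := by simp [mergeStepA]
    rw [h1, foldA_eq_gAux xs [] [x] (by simp), gAux_eq_alt xs [x] (by simp)]
    simp [merge_data_sim_alt]
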